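-- pv_equiv track=rewrite | github.com/aboutcode-org/scancode-toolkit | src/licensedcode/tokenize.py | query_tokens_slices
-- ===== SOURCE A (Python) =====
-- from collections import deque
--
-- def query_tokens_slices(tokens):
--     """
--     Return an iterable of tuple(start, tokens sub-sequence) given a `tokens`
--     sequence by breaking the tokens sequence in sub-sequences at tokens with a
--     None or -1 value. None or -1 are not returned in the sub-sequences but they
--     increment start positions.
--
--     For example:
--     >>> tokens = [1, 2, 3, 4, 5]
--     >>> list(query_tokens_slices(tokens))
--     [(0, [1, 2, 3, 4, 5])]
--
--     >>> tokens = []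
--     >>> list(query_tokens_slices(tokens))
--     []
--
--     With gaps
--     >>> tokens = [None, -1, 5, 6, 7, 8, 8, 9, 11, -1, None]
--     >>> list(query_tokens_slices(tokens))
--     [(2, [5, 6, 7, 8, 8, 9, 11])]
--
--     >>> tokens = [None, -1, 5, 6, 7, 8, -1, None, 8, 9, 11, -1, None]
--     >>> list(query_tokens_slices(tokens))
--     [(2, [5, 6, 7, 8]), (8, [8, 9, 11])]
--
--     >>> tokens = [None, -1, 5, 6, 7, 8, -1, None, 8, 9, -1, 11, -1, None]
--     >>> list(query_tokens_slices(tokens))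
--     [(2, [5, 6, 7, 8]), (8, [8, 9]), (11, [11])]
--     """
--     if not tokens:
--         return
--
--     pos_tokens = list(enumerate(tokens))
--
--     # remove leading and trailing None and -1 tokens
--     # FIXME: why -1?
--     while pos_tokens and (pos_tokens[0][1] is None or pos_tokens[0][1] < 0):
--         del pos_tokens[0]
--     while pos_tokens and (pos_tokens[-1][1] is None or pos_tokens[-1][1] < 0):
--         del pos_tokens[-1]
--
--     if not pos_tokens:
--         return
--
--     pos_tokens = iter(pos_tokens)
--
--     toks = deque()
--     # first tok is never a gap by construction
--     toks.append(next(pos_tokens))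
--
--     for start, token in pos_tokens:
--         if token is not None and token > -1:
--             toks.append((start, token,))
--         else:
--             # Here token is unknown.
--             # yield accumulated and reset
--             if toks:
--                 start, _ = toks[0]
--                 yield start, [t for _, t in toks]
--                 toks.clear()
--
--     # last sub seq
--     if toks:
--         start, _ = toks[0]
--         yield start, [t for _, t in toks]
-- ===== SOURCE B (Python) =====
-- def query_tokens_slices(tokens):
--     # Single linear pass: accumulate the current run, flush at gaps (None or < 0).
--     slices = []
--     start = 0
--     run = []
--     for i, tok in enumerate(tokens):
--         if tok is None or tok < 0:
--             if run:
--                 slices.append((start, run))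
--                 run = []
--         else:
--             if not run:
--                 start = i
--             run.append(tok)
--     if run:
--         slices.append((start, run))
--     return slices
-- ===== Notes on version B (the rewrite author's own statement) =====
-- stated objective: simpler
-- what changed: Replaces A's enumerate-list materialisation, quadratic front/back trim loops (del pos_tokens[0]) and deque of (pos,token) pairs with one linear pass that keeps only the current run's start index and values, flushing at gaps.
import Mathlib
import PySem

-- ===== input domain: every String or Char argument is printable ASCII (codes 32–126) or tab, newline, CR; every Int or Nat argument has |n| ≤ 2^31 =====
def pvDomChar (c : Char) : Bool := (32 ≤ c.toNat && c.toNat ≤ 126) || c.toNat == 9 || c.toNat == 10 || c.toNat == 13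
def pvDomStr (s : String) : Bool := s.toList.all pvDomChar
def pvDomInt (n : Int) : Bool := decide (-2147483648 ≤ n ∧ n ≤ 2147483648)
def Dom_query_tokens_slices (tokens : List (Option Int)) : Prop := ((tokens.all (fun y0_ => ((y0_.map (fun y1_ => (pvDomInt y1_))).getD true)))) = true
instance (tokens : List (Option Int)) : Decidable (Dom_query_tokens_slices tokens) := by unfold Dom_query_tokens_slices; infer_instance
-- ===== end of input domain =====

-- B is one linear pass (accumulate run, flush at None/negative gaps) instead of A's
-- enumerate-list + front/back trim loops + deque of (pos, token) pairs; same return value.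

-- ===== PORT A =====
-- gap test used by A's trim loops: `tok is None or tok < 0`
def qtsGap : Option Int → Bool
  | none => true
  | some t => decide (t < 0)

-- `while pos_tokens and (pos_tokens[0][1] is None or pos_tokens[0][1] < 0): del pos_tokens[0]`
def qtsTrimFront : List (Int × Option Int) → List (Int × Option Int)
  | [] => []
  | (i, o) :: rest => if qtsGap o then qtsTrimFront rest else (i, o) :: rest

-- `while pos_tokens and (pos_tokens[-1][1] is None or pos_tokens[-1][1] < 0): del pos_tokens[-1]`
def qtsTrimBack (ps : List (Int × Option Int)) : List (Int × Option Int) :=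
  (qtsTrimFront ps.reverse).reverse

-- the `for start, token in pos_tokens:` loop with the trailing `if toks:` flush;
-- state: toks (the deque of (start, token) pairs) and out (the values yielded so far)
def qtsALoop : List (Int × Option Int) → List (Int × Int) → List (Int × List Int) → List (Int × List Int)
  | [], toks, out =>
      match toks with
      | [] => out
      | (s, v) :: ts => out ++ [(s, v :: ts.map Prod.snd)]
  | (i, o) :: rest, toks, out =>
      match o with
      | some t =>
          if t > -1 then qtsALoop rest (toks ++ [(i, t)]) out
          else
            match toks with
            | [] => qtsALoop rest toks out
            | (s, v) :: ts => qtsALoop rest [] (out ++ [(s, v :: ts.map Prod.snd)])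
      | none =>
          match toks with
          | [] => qtsALoop rest toks out
          | (s, v) :: ts => qtsALoop rest [] (out ++ [(s, v :: ts.map Prod.snd)])

def query_tokens_slices (tokens : List (Option Int)) : List (Int × List Int) :=
  if tokens.isEmpty then []
  else
    let pos := qtsTrimBack (qtsTrimFront (PySem.List.enumerate tokens))
    match pos with
    | [] => []
    | (i, some t) :: rest => qtsALoop rest [(i, t)] []   -- `toks.append(next(pos_tokens))`
    | (_, none) :: _ => []                               -- unreachable: head is non-gap after trimming

-- ===== PORT B =====
-- single pass; state: slices accumulated, current run's start and values
def qtsBLoop : List (Int × Option Int) → List (Int × List Int) → Int → List Int → List (Int × List Int)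
  | [], out, start, run =>
      match run with
      | [] => out
      | _ => out ++ [(start, run)]
  | (i, o) :: rest, out, start, run =>
      match o with
      | none =>
          match run with
          | [] => qtsBLoop rest out start run
          | _ => qtsBLoop rest (out ++ [(start, run)]) start []
      | some t =>
          if t < 0 then
            match run with
            | [] => qtsBLoop rest out start run
            | _ => qtsBLoop rest (out ++ [(start, run)]) start []
          else
            qtsBLoop rest out (if run.isEmpty then i else start) (run ++ [t])

def query_tokens_slices_alt (tokens : List (Option Int)) : List (Int × List Int) :=
  qtsBLoop (PySem.List.enumerate tokens) [] 0 []

-- ===== PRECONDITION & SPEC =====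
def Spec_query_tokens_slices (tokens : List (Option Int)) (out : List (Int × List Int)) : Prop := out = query_tokens_slices_alt tokens
instance (tokens : List (Option Int)) (out : List (Int × List Int)) : Decidable (Spec_query_tokens_slices tokens out) := by unfold Spec_query_tokens_slices; infer_instance

-- ===== CLAIM (what is proved, stated in full; the proofs are below) =====
def Claim_equal_query_tokens_slices : Prop := ∀ (tokens : List (Option Int)), Dom_query_tokens_slices tokens → Spec_query_tokens_slices tokens (query_tokens_slices tokens)

-- ===== LEMMAS AND PROOFS =====

-- A's loop ignores a leading gap when the deque is empty
theorem qtsALoop_gap_head {i : Int} {o : Option Int} (h : qtsGap o = true)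
    (rest : List (Int × Option Int)) (out : List (Int × List Int)) :
    qtsALoop ((i, o) :: rest) [] out = qtsALoop rest [] out := by
  cases o with
  | none => rfl
  | some t =>
      simp [qtsGap] at h
      simp [qtsALoop, show ¬ (t > -1) by omega]

-- so front-trimming does not change A's loop result
theorem qtsALoop_trimFront (ps : List (Int × Option Int)) (out : List (Int × List Int)) :
    qtsALoop (qtsTrimFront ps) [] out = qtsALoop ps [] out := by
  induction ps generalizing out with
  | nil => rfl
  | cons p rest ih =>
      obtain ⟨i, o⟩ := p
      by_cases h : qtsGap o = true
      · rw [qtsTrimFront, if_pos h, qtsALoop_gap_head h, ih]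
      · rw [qtsTrimFront, if_neg h]

-- an all-gap suffix leaves only the final flush
theorem qtsALoop_gaps (gs : List (Int × Option Int)) (hg : ∀ p ∈ gs, qtsGap p.2 = true)
    (toks : List (Int × Int)) (out : List (Int × List Int)) :
    qtsALoop gs toks out = qtsALoop [] toks out := by
  induction gs generalizing toks out with
  | nil => rfl
  | cons p rest ih =>
      obtain ⟨i, o⟩ := p
      have ho : qtsGap o = true := hg (i, o) (by simp)
      have hrest : ∀ p ∈ rest, qtsGap p.2 = true := fun p hp => hg p (by simp [hp])
      cases o with
      | none =>
          cases toks with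
          | nil => rw [show qtsALoop ((i, none) :: rest) [] out = qtsALoop rest [] out from rfl, ih hrest]
          | cons t ts =>
              obtain ⟨s, v⟩ := t
              rw [show qtsALoop ((i, none) :: (rest)) ((s, v) :: ts) out
                  = qtsALoop rest [] (out ++ [(s, v :: ts.map Prod.snd)]) from rfl, ih hrest]
              rfl
      | some t =>
          simp [qtsGap] at ho
          cases toks with
          | nil =>
              rw [show qtsALoop ((i, some t) :: rest) [] out = qtsALoop rest [] out by
                    simp [qtsALoop, show ¬ (t > -1) by omega], ih hrest]
          | cons x ts =>
              obtain ⟨s, v⟩ := x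
              rw [show qtsALoop ((i, some t) :: rest) ((s, v) :: ts) out
                  = qtsALoop rest [] (out ++ [(s, v :: ts.map Prod.snd)]) by
                    simp [qtsALoop, show ¬ (t > -1) by omega], ih hrest]
              rfl

-- so back-trimming does not change A's loop result either
theorem qtsALoop_append_gaps (ms gs : List (Int × Option Int)) (hg : ∀ p ∈ gs, qtsGap p.2 = true)
    (toks : List (Int × Int)) (out : List (Int × List Int)) :
    qtsALoop (ms ++ gs) toks out = qtsALoop ms toks out := by
  induction ms generalizing toks out with
  | nil => simpa using qtsALoop_gaps gs hg toks out
  | cons p rest ih =>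
      obtain ⟨i, o⟩ := p
      cases o with
      | none =>
          cases toks with
          | nil => simp only [List.cons_append, qtsALoop]; exact ih _ _
          | cons x ts => obtain ⟨s, v⟩ := x; simp only [List.cons_append, qtsALoop]; exact ih _ _
      | some t =>
          by_cases h : t > -1
          · simp only [List.cons_append, qtsALoop, if_pos h]; exact ih _ _
          · cases toks with
            | nil => simp only [List.cons_append, qtsALoop, if_neg h]; exact ih _ _
            | cons x ts =>
                obtain ⟨s, v⟩ := x
                simp only [List.cons_append, qtsALoop, if_neg h]; exact ih _ _

-- trimFront removes an all-gap prefix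
theorem qtsTrimFront_split (ps : List (Int × Option Int)) :
    ∃ gs, ps = gs ++ qtsTrimFront ps ∧ ∀ p ∈ gs, qtsGap p.2 = true := by
  induction ps with
  | nil => exact ⟨[], rfl, by simp⟩
  | cons p rest ih =>
      obtain ⟨i, o⟩ := p
      by_cases h : qtsGap o = true
      · obtain ⟨gs, hgs, hall⟩ := ih
        refine ⟨(i, o) :: gs, ?_, ?_⟩
        · rw [qtsTrimFront, if_pos h]; simpa using hgs
        · intro q hq
          rcases List.mem_cons.mp hq with hq | hq
          · subst hq; exact h
          · exact hall q hq
      · refine ⟨[], ?_, by simp⟩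
        simp [qtsTrimFront, h]

-- trimBack removes an all-gap suffix
theorem qtsTrimBack_split (ps : List (Int × Option Int)) :
    ∃ gs, ps = qtsTrimBack ps ++ gs ∧ ∀ p ∈ gs, qtsGap p.2 = true := by
  obtain ⟨gs, hgs, hall⟩ := qtsTrimFront_split ps.reverse
  refine ⟨gs.reverse, ?_, fun p hp => hall p (List.mem_reverse.mp hp)⟩
  rw [qtsTrimBack]
  have := congrArg List.reverse hgs
  simpa using this

-- the head of trimFront's result is a non-gap
theorem qtsTrimFront_head (ps : List (Int × Option Int)) (i : Int) (o : Option Int)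
    (rest : List (Int × Option Int)) (h : qtsTrimFront ps = (i, o) :: rest) :
    qtsGap o = false := by
  induction ps with
  | nil => simp [qtsTrimFront] at h
  | cons p tl ih =>
      obtain ⟨j, u⟩ := p
      by_cases hg : qtsGap u = true
      · rw [qtsTrimFront, if_pos hg] at h; exact ih h
      · rw [qtsTrimFront, if_neg hg] at h
        cases h
        simpa using hg

-- MAIN invariant: A's loop and B's loop agree when the deque matches (start, run)
theorem qtsLoop_eq (ps : List (Int × Option Int)) (out : List (Int × List Int))
    (toks : List (Int × Int)) (start : Int) (run : List Int)
    (hrun : run = toks.map Prod.snd)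
    (hstart : ∀ s v ts, toks = (s, v) :: ts → s = start) :
    qtsALoop ps toks out = qtsBLoop ps out start run := by
  induction ps generalizing out toks start run with
  | nil =>
      cases toks with
      | nil => simp at hrun; subst hrun; rfl
      | cons x ts =>
          obtain ⟨s, v⟩ := x
          have hs : s = start := hstart s v ts rfl
          subst hs hrun
          rfl
  | cons p rest ih =>
      obtain ⟨i, o⟩ := p
      cases o with
      | none =>
          cases toks with
          | nil =>
              simp at hrun; subst hrun
              exact ih out [] start [] rfl (by intro s v ts h; cases h)
          | cons x ts =>
              obtain ⟨s, v⟩ := x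
              have hs : s = start := hstart s v ts rfl
              subst hs hrun
              show qtsALoop rest [] (out ++ [(s, v :: ts.map Prod.snd)])
                  = qtsBLoop rest (out ++ [(s, v :: ts.map Prod.snd)]) s []
              exact ih _ [] s [] rfl (by intro a b c h; cases h)
      | some t =>
          by_cases h : t > -1
          · have hB : ¬ t < 0 := by omega
            cases toks with
            | nil =>
                simp at hrun; subst hrun
                rw [show qtsALoop ((i, some t) :: rest) [] out = qtsALoop rest [(i, t)] out by
                      simp [qtsALoop, h],
                    show qtsBLoop ((i, some t) :: rest) out start [] = qtsBLoop rest out i [t] by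
                      simp [qtsBLoop, hB]]
                exact ih out [(i, t)] i [t] (by simp) (by intro s v ts hh; cases hh; rfl)
            | cons x ts =>
                obtain ⟨s, v⟩ := x
                have hs : s = start := hstart s v ts rfl
                subst hs hrun
                simp only [List.map_cons]
                rw [show qtsALoop ((i, some t) :: rest) ((s, v) :: ts) out
                      = qtsALoop rest (((s, v) :: ts) ++ [(i, t)]) out by
                      simp [qtsALoop, h],
                    show qtsBLoop ((i, some t) :: rest) out s (v :: ts.map Prod.snd)
                      = qtsBLoop rest out s ((v :: ts.map Prod.snd) ++ [t]) by
                      simp [qtsBLoop, hB]]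
                refine ih out (((s, v) :: ts) ++ [(i, t)]) s ((v :: ts.map Prod.snd) ++ [t]) (by simp) ?_
                intro a b c hh
                simp only [List.cons_append] at hh
                cases hh; rfl
          · have hB : t < 0 := by omega
            cases toks with
            | nil =>
                simp at hrun; subst hrun
                show qtsALoop ((i, some t) :: rest) [] out = qtsBLoop ((i, some t) :: rest) out start []
                rw [show qtsALoop ((i, some t) :: rest) [] out = qtsALoop rest [] out by
                      simp [qtsALoop, h]]
                rw [show qtsBLoop ((i, some t) :: rest) out start [] = qtsBLoop rest out start [] by
                      simp [qtsBLoop, hB]]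
                exact ih out [] start [] rfl (by intro s v ts hh; cases hh)
            | cons x ts =>
                obtain ⟨s, v⟩ := x
                have hs : s = start := hstart s v ts rfl
                subst hs hrun
                simp only [List.map_cons]
                rw [show qtsALoop ((i, some t) :: rest) ((s, v) :: ts) out
                      = qtsALoop rest [] (out ++ [(s, v :: ts.map Prod.snd)]) by
                      simp [qtsALoop, h]]
                rw [show qtsBLoop ((i, some t) :: rest) out s (v :: ts.map Prod.snd)
                      = qtsBLoop rest (out ++ [(s, v :: ts.map Prod.snd)]) s [] by
                      simp [qtsBLoop, hB]]
                exact ih _ [] s [] rfl (by intro a b c hh; cases hh)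

-- A equals its own loop run on the raw enumerate list (trims and the special head are redundant)
theorem qtsA_eq_loop (tokens : List (Option Int)) :
    query_tokens_slices tokens = qtsALoop (PySem.List.enumerate tokens) [] [] := by
  by_cases he : tokens.isEmpty
  · have : tokens = [] := by cases tokens <;> simp_all
    subst this; rfl
  · rw [query_tokens_slices, if_neg he]
    obtain ⟨gs, hgs, hall⟩ := qtsTrimBack_split (qtsTrimFront (PySem.List.enumerate tokens))
    have hback : qtsALoop (qtsTrimBack (qtsTrimFront (PySem.List.enumerate tokens))) [] []
        = qtsALoop (PySem.List.enumerate tokens) [] [] := by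
      calc qtsALoop (qtsTrimBack (qtsTrimFront (PySem.List.enumerate tokens))) [] []
          = qtsALoop (qtsTrimBack (qtsTrimFront (PySem.List.enumerate tokens)) ++ gs) [] [] :=
            (qtsALoop_append_gaps _ gs hall [] []).symm
        _ = qtsALoop (qtsTrimFront (PySem.List.enumerate tokens)) [] [] := by rw [← hgs]
        _ = qtsALoop (PySem.List.enumerate tokens) [] [] := qtsALoop_trimFront _ _
    cases hpos : qtsTrimBack (qtsTrimFront (PySem.List.enumerate tokens)) with
    | nil =>
        rw [hpos] at hback
        simpa using hback.symm
    | cons p rest =>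
        obtain ⟨i, o⟩ := p
        have hhead : qtsGap o = false := by
          have : qtsTrimFront (PySem.List.enumerate tokens) = (i, o) :: (rest ++ gs) := by
            rw [hgs, hpos]; rfl
          exact qtsTrimFront_head _ _ _ _ this
        cases o with
        | none => simp [qtsGap] at hhead
        | some t =>
            have ht : t > -1 := by simp [qtsGap] at hhead; omega
            rw [hpos] at hback
            rw [show qtsALoop ((i, some t) :: rest) [] [] = qtsALoop rest [(i, t)] [] by
                  simp [qtsALoop, ht]] at hback
            simpa using hback

-- ===== VERDICT (by name: the statement is the Claim_ definition above) =====
theorem query_tokens_slices_spec : Claim_equal_query_tokens_slices := by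
  intro tokens _
  show query_tokens_slices tokens = query_tokens_slices_alt tokens
  rw [qtsA_eq_loop, query_tokens_slices_alt]
  exact qtsLoop_eq _ _ [] 0 [] rfl (by intro s v ts h; cases h)
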